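-- pv_equiv track=rewrite | github.com/jainary4/Quantum-Imaging | Circuits/Target_present_polynomial.py | generate_block_basis
-- ===== SOURCE A (Python) =====
-- import itertools
--
-- def generate_block_basis(M, d):
--     """Pre-computes the valid basis states for each Nc block."""
--     basis_by_Nc = {}
--     # itertools.product ensures exact lexicographical ordering to match old matrix
--     all_n_dists = list(itertools.product(range(d), repeat=M))
--
--     for k in range(M):
--         for n_tuple in all_n_dists:
--             Nc = sum(n_tuple)
--             if Nc not in basis_by_Nc:
--                 basis_by_Nc[Nc] = []
--             basis_by_Nc[Nc].append((k, n_tuple))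
--
--     return basis_by_Nc
-- ===== SOURCE B (Python) =====
-- import itertools
--
-- def generate_block_basis(M, d):
--     """Pre-computes the valid basis states for each Nc block.
--
--     Groups the d**M distributions by their sum in ONE pass, then builds the
--     result as a single dict comprehension expanding each group over all k,
--     instead of re-scanning all distributions (with sum and membership test)
--     for every k.
--     """
--     if M == 0:
--         return {}
--     groups = {}
--     for t in itertools.product(range(d), repeat=M):
--         groups.setdefault(sum(t), []).append(t)
--     return {Nc: [(k, t) for k in range(M) for t in g] for Nc, g in groups.items()}
-- ===== Notes on version B (the rewrite author's own statement) =====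
-- stated objective: alternative
-- what changed: B groups the d^M distributions by sum in one pass (setdefault dict), then emits the whole result as a single dict comprehension that expands each sum-group over all k, instead of re-scanning every distribution with a sum recomputation and membership test for each of the M values of k.
-- outside the precondition, e.g. on generate_block_basis(-1, 2): A raises ValueError, B raises ValueError
import Mathlib
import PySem

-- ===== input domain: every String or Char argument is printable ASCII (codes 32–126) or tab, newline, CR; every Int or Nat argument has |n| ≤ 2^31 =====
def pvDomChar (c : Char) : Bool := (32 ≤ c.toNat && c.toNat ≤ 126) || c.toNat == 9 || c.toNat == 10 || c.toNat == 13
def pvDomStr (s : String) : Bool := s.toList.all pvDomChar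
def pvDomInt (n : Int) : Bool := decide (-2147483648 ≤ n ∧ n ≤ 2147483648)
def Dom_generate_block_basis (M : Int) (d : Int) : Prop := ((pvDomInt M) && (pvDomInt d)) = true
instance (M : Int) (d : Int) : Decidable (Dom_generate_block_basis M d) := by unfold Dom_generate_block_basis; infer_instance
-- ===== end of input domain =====

-- B groups the d^M distributions by sum in ONE pass and then emits the whole dict as a single
-- comprehension expanding each group over all k, instead of re-scanning every distribution
-- (recomputing its sum and a membership test) for each k.

-- ===== PORT A =====

-- itertools.product(range(d), repeat=m): lexicographic, first coordinate varies slowest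
def pyProduct (d : Int) : Nat → List (List Int)
  | 0 => [[]]
  | m + 1 => (PySem.List.pyRange 0 d 1).flatMap (fun x => (pyProduct d m).map (fun t => x :: t))

def generate_block_basis (M : Int) (d : Int) : List (Int × List (Int × List Int)) :=
  ((PySem.List.pyRange 0 M 1).foldl (fun basis k =>
      (pyProduct d M.toNat).foldl (fun basis t =>
        -- 'if Nc not in basis_by_Nc: basis_by_Nc[Nc] = []' then the in-place append (= modify)
        (if basis.contains t.sum then basis else basis.insert t.sum []).modify t.sum []
          (fun l => l ++ [(k, t)])) basis)
    (PySem.Dict.empty : PySem.Dict Int (List (Int × List Int)))).items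

-- ===== PORT B =====

-- 'groups.setdefault(s, []).append(t)' mutates the value at s in place: exactly modify s [] (· ++ [t]);
-- the final dict comprehension maps over groups.items(), the inner list comprehension is a flatMap.
def generate_block_basis_alt (M : Int) (d : Int) : List (Int × List (Int × List Int)) :=
  if M == 0 then [] else
    ((pyProduct d M.toNat).foldl (fun sg t => sg.modify t.sum [] (fun l => l ++ [t]))
        (PySem.Dict.empty : PySem.Dict Int (List (List Int)))).items.map
      (fun p => (p.1, (PySem.List.pyRange 0 M 1).flatMap (fun k => p.2.map (fun t => (k, t)))))

-- ===== PRECONDITION & SPEC =====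
-- Pre_ excludes M < 0 only: there A (and B) raise ValueError in itertools.product(..., repeat=M).
def Pre_generate_block_basis (M : Int) (d : Int) : Prop := 0 ≤ M
instance (M : Int) (d : Int) : Decidable (Pre_generate_block_basis M d) := by
  unfold Pre_generate_block_basis; infer_instance

def pvWitness_generate_block_basis : Int × Int := (2, 2)

def Spec_generate_block_basis (M : Int) (d : Int) (out : List (Int × List (Int × List Int))) : Prop :=
  out = generate_block_basis_alt M d
instance (M : Int) (d : Int) (out : List (Int × List (Int × List Int))) : Decidable (Spec_generate_block_basis M d out) := by
  unfold Spec_generate_block_basis; infer_instance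

-- ===== CLAIM =====
def Claim_equal_generate_block_basis : Prop := ∀ (M : Int) (d : Int), Dom_generate_block_basis M d → Pre_generate_block_basis M d → Spec_generate_block_basis M d (generate_block_basis M d)

-- ===== LEMMAS AND PROOFS =====

-- A's two-step 'ensure key then append' equals a single modify.
theorem stepA_eq (b : PySem.Dict Int (List (Int × List Int))) (Nc : Int) (e : Int × List Int) :
    (if b.contains Nc then b else b.insert Nc []).modify Nc [] (fun l => l ++ [e])
      = b.modify Nc [] (fun l => l ++ [e]) := by
  by_cases h : b.contains Nc = true
  · simp [h]
  · have h' : b.contains Nc = false := by simpa using h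
    show ((if b.contains Nc then b else b.insert Nc []).insert Nc _) = b.insert Nc _
    rw [h']
    simp [PySem.Dict.getD_insert_self, PySem.Dict.insert_insert_self,
      PySem.Dict.getD_of_not_contains b ([] : List (Int × List Int)) h']

theorem flatten_map_singleton {α β : Type} (f : α → β) :
    ∀ (l : List α), (l.map (fun x => [f x])).flatten = l.map f
  | [] => rfl
  | x :: xs => by simp [flatten_map_singleton f xs]

-- getD after a fold that appends a chunk per element (used by both ports' loops).
theorem getD_fold_chunks {α ν : Type} (key : α → Int) (val : α → List ν) (c : Int) :
    ∀ (l : List α) (d : PySem.Dict Int (List ν)),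
      (l.foldl (fun d x => d.modify (key x) [] (fun v => v ++ val x)) d).getD c []
        = d.getD c [] ++ ((l.filter (fun x => key x == c)).map val).flatten := by
  intro l
  induction l with
  | nil => intro d; simp
  | cons x xs ih =>
    intro d
    by_cases h : key x = c
    · simp [ih, h, PySem.Dict.getD_modify_self]
    · have hne : c ≠ key x := fun hh => h hh.symm
      simp [ih, h,
        PySem.Dict.getD_modify_of_ne d ([] : List ν) (fun v => v ++ val x) hne]

-- updating a set with the very list it came from changes nothing
theorem update_ofList_self {α : Type} [DecidableEq α] (xs : List α) :
    PySem.Set.update (PySem.Set.ofList xs) xs = PySem.Set.ofList xs := by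
  rw [PySem.Set.update_eq_append_filter]
  have h : (PySem.Set.ofList xs).filter (fun y => !(PySem.Set.contains (PySem.Set.ofList xs) y)) = [] := by
    apply List.filter_eq_nil_iff.mpr
    intro a ha
    have : a ∈ xs := by rw [PySem.Set.mem_ofList] at ha; exact ha
    simp [this]
  rw [h, List.append_nil]

-- getD of A's outer loop over the k's, starting from any dict
theorem foldA_getD (P : List (List Int)) (c : Int) :
    ∀ (R : List Int) (b : PySem.Dict Int (List (Int × List Int))),
      (R.foldl (fun basis k => P.foldl
          (fun b t => b.modify t.sum [] (fun l => l ++ [(k, t)])) basis) b).getD c []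
        = b.getD c [] ++ R.flatMap (fun k => (P.filter (fun t => t.sum == c)).map (fun t => (k, t))) := by
  intro R
  induction R with
  | nil => intro b; simp
  | cons k R ih =>
    intro b
    simp only [List.foldl_cons, List.flatMap_cons]
    rw [ih, getD_fold_chunks List.sum (fun t => [(k, t)]) c P b, flatten_map_singleton,
      List.append_assoc]

-- keys of A's outer loop
theorem foldA_keys (P : List (List Int)) :
    ∀ (R : List Int) (b : PySem.Dict Int (List (Int × List Int))),
      (R.foldl (fun basis k => P.foldl
          (fun b t => b.modify t.sum [] (fun l => l ++ [(k, t)])) basis) b).keys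
        = R.foldl (fun ks _ => PySem.Set.update ks (P.map List.sum)) b.keys := by
  intro R
  induction R with
  | nil => intro b; rfl
  | cons k R ih =>
    intro b
    simp only [List.foldl_cons]
    rw [ih, PySem.Dict.keys_foldl_modify_key]

theorem foldl_update_const {α : Type} [DecidableEq α] (xs : List α) :
    ∀ (R : List Int),
      R.foldl (fun ks _ => PySem.Set.update ks xs) (PySem.Set.ofList xs) = PySem.Set.ofList xs := by
  intro R
  induction R with
  | nil => rfl
  | cons k R ih => simp only [List.foldl_cons]; rw [update_ofList_self, ih]

-- ===== VERDICT =====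
theorem generate_block_basis_spec : Claim_equal_generate_block_basis := by
  intro M d _ hM
  unfold Spec_generate_block_basis generate_block_basis generate_block_basis_alt
  -- fold A's 'ensure then append' into a single modify
  have hA : (fun (basis : PySem.Dict Int (List (Int × List Int))) (k : Int) =>
      (pyProduct d M.toNat).foldl (fun basis t =>
        (if basis.contains t.sum then basis else basis.insert t.sum []).modify t.sum []
          (fun l => l ++ [(k, t)])) basis)
      = fun basis k => (pyProduct d M.toNat).foldl
          (fun b t => b.modify t.sum [] (fun l => l ++ [(k, t)])) basis := by
    funext basis k
    have hf : (fun (b : PySem.Dict Int (List (Int × List Int))) (t : List Int) =>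
        (if b.contains t.sum then b else b.insert t.sum []).modify t.sum []
          (fun l => l ++ [(k, t)]))
        = fun b t => b.modify t.sum [] (fun l => l ++ [(k, t)]) := by
      funext b t; exact stepA_eq b t.sum (k, t)
    rw [hf]
  rw [hA]
  set P := pyProduct d M.toNat with hP
  set R := PySem.List.pyRange 0 M 1 with hR
  by_cases hM0 : M = 0
  · subst hM0
    rw [show R = [] from PySem.List.pyRange_one_eq_nil (le_refl 0)]
    rfl
  · -- 0 < M: B's guard does not fire
    have hMpos : 0 < M := lt_of_le_of_ne hM (Ne.symm hM0)
    have hguard : (M == 0) = false := by simpa using hM0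
    rw [hguard]
    simp only [Bool.false_eq_true, if_false]
    -- the left dict F
    set F := R.foldl (fun basis k => P.foldl
        (fun b t => b.modify t.sum [] (fun l => l ++ [(k, t)])) basis)
      (PySem.Dict.empty : PySem.Dict Int (List (Int × List Int))) with hF
    -- the right dict sg
    set sg := P.foldl (fun sg t => sg.modify t.sum [] (fun l => l ++ [t]))
      (PySem.Dict.empty : PySem.Dict Int (List (List Int))) with hsg
    have hsgnd : sg.keys.Nodup := by
      rw [hsg]; exact PySem.Dict.nodup_keys_foldl_modify_key _ _ _ _ _ (by simp)
    have hsgk : sg.keys = PySem.Set.ofList (P.map List.sum) := by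
      rw [hsg, PySem.Dict.keys_foldl_modify_key]
      simp [PySem.Set.update_nil_left]
    have hsgD : ∀ c, sg.getD c [] = P.filter (fun t => t.sum == c) := by
      intro c
      rw [hsg, getD_fold_chunks List.sum (fun t => [t]) c P PySem.Dict.empty]
      simp [flatten_map_singleton]
    have hFk : F.keys = PySem.Set.ofList (P.map List.sum) := by
      rw [hF, foldA_keys, show R = 0 :: PySem.List.pyRange 1 M 1 from
          PySem.List.pyRange_one_cons hMpos]
      simp only [List.foldl_cons]
      rw [show PySem.Set.update ((PySem.Dict.empty : PySem.Dict Int (List (Int × List Int))).keys)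
            (P.map List.sum) = PySem.Set.ofList (P.map List.sum) from by
          simp [PySem.Set.update_nil_left]]
      exact foldl_update_const (P.map List.sum) _
    have hFnd : F.keys.Nodup := by rw [hFk]; exact PySem.Set.nodup_ofList _
    have hFD : ∀ c, F.getD c [] =
        R.flatMap (fun k => (P.filter (fun t => t.sum == c)).map (fun t => (k, t))) := by
      intro c
      rw [hF, foldA_getD]
      simp
    rw [PySem.Dict.items_eq_map_keys F hFnd ([] : List (Int × List Int)),
      PySem.Dict.items_eq_map_keys sg hsgnd ([] : List (List Int)), hFk, hsgk, List.map_map]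
    apply List.map_congr_left
    intro s _
    simp [Function.comp, hFD s, hsgD s]
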